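-- pv_equiv track=rewrite | github.com/dratcliff/advent-of-code | 2015/Day5.py | is_nice_string2
-- ===== SOURCE A (Python) =====
-- def is_nice_string2(s):
--     rule_1 = False
--     rule_2 = False
--     for i in range(0, len(s)-1):
--         if s.find(s[i:i+2], i+2) != -1:
--             rule_1 = True
--         if i < len(s) - 2 and s[i] == s[i+2]:
--             rule_2 = True
--     return rule_1 and rule_2
-- ===== SOURCE B (Python) =====
-- def is_nice_string2(s):
--     # Rule 2: some letter repeats with exactly one character between.
--     rule2 = any(s[i] == s[i + 2] for i in range(len(s) - 2))
--     # Rule 1: single pass with a dict of each pair's first position,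
--     # so no inner substring scan is needed.
--     first = {}
--     rule1 = False
--     for i in range(len(s) - 1):
--         pair = s[i:i + 2]
--         if pair in first:
--             if i - first[pair] >= 2:
--                 rule1 = True
--         else:
--             first[pair] = i
--     return rule1 and rule2
-- ===== Notes on version B (the rewrite author's own statement) =====
-- stated objective: faster
-- what changed: Replaces the per-position forward substring scan (str.find from i+2) with a single pass that records each pair's first occurrence in a dict and flags a non-overlapping repeat when a pair recurs at distance >= 2; rule 2 becomes its own linear any() pass.
import Mathlib
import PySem

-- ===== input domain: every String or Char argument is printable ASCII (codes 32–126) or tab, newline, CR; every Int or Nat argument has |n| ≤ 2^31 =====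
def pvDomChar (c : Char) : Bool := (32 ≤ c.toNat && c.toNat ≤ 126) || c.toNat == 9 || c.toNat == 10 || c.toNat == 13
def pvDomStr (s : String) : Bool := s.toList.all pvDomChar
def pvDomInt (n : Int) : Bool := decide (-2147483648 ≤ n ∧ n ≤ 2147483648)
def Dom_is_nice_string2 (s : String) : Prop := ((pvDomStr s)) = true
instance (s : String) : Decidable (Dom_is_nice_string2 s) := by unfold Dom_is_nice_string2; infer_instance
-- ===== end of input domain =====

-- B replaces A's per-position forward substring scan (rule 1) by one pass keeping each
-- pair's first position in a dict, and checks rule 2 in its own linear pass.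

-- ===== PORT A =====
def is_nice_string2 (s : String) : Bool :=
  let n : Int := PySem.Str.len s
  let r := (PySem.List.pyRange 0 (n - 1) 1).foldl
    (fun (st : Bool × Bool) (i : Int) =>
      ((if PySem.Str.findFrom s (PySem.Str.slice s (some i) (some (i + 2))) (i + 2) none ≠ -1 then true else st.1),
       (if (i < n - 2 ∧ PySem.Str.pyGet? s i = PySem.Str.pyGet? s (i + 2)) then true else st.2)))
    (false, false)
  r.1 && r.2

-- ===== PORT B =====
-- the body of B's single loop: look the pair up in the first-occurrence dict
def bodyB (s : String) (st : PySem.Dict String Int × Bool) (i : Int) : PySem.Dict String Int × Bool :=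
  let pair := PySem.Str.slice s (some i) (some (i + 2))
  match st.1.get? pair with
  | some f => (st.1, if 2 ≤ i - f then true else st.2)
  | none => (st.1.insert pair i, st.2)

def is_nice_string2_alt (s : String) : Bool :=
  let n : Int := PySem.Str.len s
  let rule2 := (PySem.List.pyRange 0 (n - 2) 1).any
    (fun i => PySem.Str.pyGet? s i == PySem.Str.pyGet? s (i + 2))
  let r := (PySem.List.pyRange 0 (n - 1) 1).foldl (bodyB s) (PySem.Dict.empty, false)
  r.2 && rule2

-- ===== PRECONDITION & SPEC =====
def Spec_is_nice_string2 (s : String) (out : Bool) : Prop := out = is_nice_string2_alt s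
instance (s : String) (out : Bool) : Decidable (Spec_is_nice_string2 s out) := by unfold Spec_is_nice_string2; infer_instance

-- ===== CLAIM (what is proved, stated in full; the proofs are below) =====
def Claim_equal_is_nice_string2 : Prop := ∀ (s : String), Dom_is_nice_string2 s → Spec_is_nice_string2 s (is_nice_string2 s)

-- ===== LEMMAS AND PROOFS =====

-- the two-character window of l starting at i (Python s[i:i+2])
def pairAt (l : List Char) (i : Nat) : List Char := (l.drop i).take 2

-- canonical readings of the two niceness rules
def NiceR1 (l : List Char) : Prop := ∃ j, j + 2 ≤ l.length ∧ ∃ i, i + 2 ≤ j ∧ pairAt l i = pairAt l j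
def NiceR2 (l : List Char) : Prop := ∃ i, i + 2 < l.length ∧ l[i]? = l[i + 2]?

lemma ite_true_or {c : Prop} [Decidable c] (b : Bool) : (if c then true else b) = (decide c || b) := by
  by_cases h : c <;> simp [h]

lemma cast_add_two (k : Nat) : ((k : Int) + 2) = ((k + 2 : Nat) : Int) := by push_cast; ring

lemma foldl_flags (p q : Nat → Bool) (k : Nat) (a b : Bool) :
    (List.range k).foldl (fun st i => (p i || st.1, q i || st.2)) (a, b)
    = (a || (List.range k).any p, b || (List.range k).any q) := by
  induction k generalizing a b with
  | zero => simp
  | succ k ih =>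
    rw [List.range_succ, List.foldl_append, ih]
    simp [List.any_append]
    constructor <;> [cases a <;> cases p k <;> simp; cases b <;> cases q k <;> simp]

lemma pairAt_length (l : List Char) (i : Nat) (h : i + 2 ≤ l.length) : (pairAt l i).length = 2 := by
  simp [pairAt]; omega

lemma pairAt_toList (s : String) (i : Nat) :
    (PySem.Str.slice s (some (i : Int)) (some ((i : Int) + 2))).toList = pairAt s.toList i := by
  rw [PySem.Str.toList_slice]
  simp only [PySem.Chars.slice_eq_listSlice]
  rw [PySem.List.slice_toNat _ (by positivity) (by positivity)]
  simp [pairAt]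
  congr 1
  omega

lemma K_eq_iff (s : String) (i j : Nat) :
    PySem.Str.slice s (some (i : Int)) (some ((i : Int) + 2))
      = PySem.Str.slice s (some (j : Int)) (some ((j : Int) + 2))
    ↔ pairAt s.toList i = pairAt s.toList j := by
  rw [← String.toList_inj, pairAt_toList, pairAt_toList]

lemma infix_pair (l sub : List Char) (d : Nat) (hs : sub.length = 2) :
    sub <:+: l.drop d ↔ ∃ j, d ≤ j ∧ j + 2 ≤ l.length ∧ sub = pairAt l j := by
  constructor
  · rintro ⟨t, u, htu⟩
    rw [List.append_assoc] at htu
    have hdrop : l.drop (d + t.length) = sub ++ u := by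
      rw [← List.drop_drop, ← htu, List.drop_left]
    have hlen : (l.drop (d + t.length)).length = l.length - (d + t.length) := List.length_drop ..
    refine ⟨d + t.length, by omega, by rw [hdrop] at hlen; simp at hlen; omega, ?_⟩
    simp [pairAt, hdrop, List.take_left' hs]
  · rintro ⟨j, hdj, hjl, hsub⟩
    have h1 : l.drop j = sub ++ (l.drop j).drop 2 := by
      rw [hsub]; simp [pairAt]
    have h2 : l.drop d = (l.drop d).take (j - d) ++ l.drop j := by
      conv_lhs => rw [← List.take_append_drop (j - d) (l.drop d)]
      rw [List.drop_drop]
      congr 2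
      omega
    exact ⟨(l.drop d).take (j - d), (l.drop j).drop 2, by rw [List.append_assoc, ← h1, ← h2]⟩

lemma findFrom_pair (l : List Char) (i : Nat) (h : i + 2 ≤ l.length) :
    (PySem.Chars.findFrom l (pairAt l i) ((i : Int) + 2) none ≠ -1)
      ↔ ∃ j, i + 2 ≤ j ∧ j + 2 ≤ l.length ∧ pairAt l i = pairAt l j := by
  rw [cast_add_two i, Ne, PySem.Chars.findFrom_natCast_eq_neg_one_iff l (pairAt l i) (i + 2) h,
      not_not, infix_pair l (pairAt l i) (i + 2) (pairAt_length l i h)]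

lemma find?_range_min (p : Nat → Bool) (k a : Nat) (h : (List.range k).find? p = some a) :
    p a = true ∧ a < k ∧ ∀ b < a, p b = false := by
  induction k with
  | zero => simp at h
  | succ k ih =>
    rw [List.range_succ, List.find?_append] at h
    cases hf : (List.range k).find? p with
    | some x =>
      rw [hf] at h; simp at h; subst h
      obtain ⟨h1, h2, h3⟩ := ih hf
      exact ⟨h1, by omega, h3⟩
    | none =>
      rw [hf] at h; simp at h
      obtain ⟨h1, h2⟩ := h
      refine ⟨by simp [← h1, h2], by omega, ?_⟩
      intro b hb
      have := List.find?_eq_none.mp hf b (by simp; omega)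
      simpa using this

lemma A_char (s : String) : is_nice_string2 s = true ↔ NiceR1 s.toList ∧ NiceR2 s.toList := by
  unfold is_nice_string2
  simp only [PySem.Str.len_eq, PySem.List.pyRange_one, List.foldl_map, zero_add, ite_true_or]
  rw [foldl_flags]
  simp only [Bool.false_or, Bool.and_eq_true, List.any_eq_true, List.mem_range, decide_eq_true_eq]
  apply and_congr
  · constructor
    · rintro ⟨y, hy, hfind⟩
      rw [PySem.Str.findFrom_eq, pairAt_toList] at hfind
      obtain ⟨j, h1, h2, h3⟩ := (findFrom_pair s.toList y (by omega)).mp hfind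
      exact ⟨j, h2, y, h1, h3⟩
    · rintro ⟨j, hj, i, hij, hpair⟩
      refine ⟨i, by omega, ?_⟩
      rw [PySem.Str.findFrom_eq, pairAt_toList]
      exact (findFrom_pair s.toList i (by omega)).mpr ⟨j, hij, hj, hpair⟩
  · constructor
    · rintro ⟨y, hy, hlt, he⟩
      refine ⟨y, by omega, ?_⟩
      simpa only [cast_add_two, PySem.Str.pyGet?_natCast] using he
    · rintro ⟨i, hi, he⟩
      refine ⟨i, by omega, by omega, ?_⟩
      simpa only [cast_add_two, PySem.Str.pyGet?_natCast] using he

lemma bodyB_step_some (s : String) (st : PySem.Dict String Int × Bool) (i f : Int)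
    (h : st.1.get? (PySem.Str.slice s (some i) (some (i + 2))) = some f) :
    bodyB s st i = (st.1, if 2 ≤ i - f then true else st.2) := by
  simp only [bodyB, h]

lemma bodyB_step_none (s : String) (st : PySem.Dict String Int × Bool) (i : Int)
    (h : st.1.get? (PySem.Str.slice s (some i) (some (i + 2))) = none) :
    bodyB s st i = (st.1.insert (PySem.Str.slice s (some i) (some (i + 2))) i, st.2) := by
  simp only [bodyB, h]

lemma B_loop (s : String) (k : Nat) :
    (∀ q : String,
      ((List.range k).foldl (fun x (y : Nat) => bodyB s x (y : Int)) (PySem.Dict.empty, false)).1.get? q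
        = ((List.range k).find? (fun i : Nat =>
            PySem.Str.slice s (some (i : Int)) (some ((i : Int) + 2)) == q)).map (fun i : Nat => (i : Int)))
  ∧ (((List.range k).foldl (fun x (y : Nat) => bodyB s x (y : Int)) (PySem.Dict.empty, false)).2 = true
        ↔ ∃ j, j < k ∧ ∃ i, i + 2 ≤ j ∧ pairAt s.toList i = pairAt s.toList j) := by
  induction k with
  | zero => simp
  | succ k ih =>
    obtain ⟨ihd, ihf⟩ := ih
    rw [List.range_succ, List.foldl_append, List.foldl_cons, List.foldl_nil]
    cases hf : (List.range k).find? (fun i : Nat =>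
        PySem.Str.slice s (some (i : Int)) (some ((i : Int) + 2))
          == PySem.Str.slice s (some (k : Int)) (some ((k : Int) + 2))) with
    | some f' =>
      have hg : ((List.range k).foldl (fun x (y : Nat) => bodyB s x (y : Int)) (PySem.Dict.empty, false)).1.get?
          (PySem.Str.slice s (some (k : Int)) (some ((k : Int) + 2))) = some (f' : Int) := by
        rw [ihd, hf]; rfl
      rw [bodyB_step_some s _ _ _ hg]
      obtain ⟨hp, hfk, hmin⟩ := find?_range_min _ k f' hf
      have hKf : pairAt s.toList f' = pairAt s.toList k :=
        (K_eq_iff s f' k).mp (beq_iff_eq.mp (by simpa using hp))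
      constructor
      · intro q
        rw [ihd, List.find?_append]
        cases hq : (List.range k).find? (fun i : Nat =>
            PySem.Str.slice s (some (i : Int)) (some ((i : Int) + 2)) == q) with
        | some x => simp
        | none =>
          simp only [Option.none_or]
          have hne : ¬ (PySem.Str.slice s (some (k : Int)) (some ((k : Int) + 2)) == q) = true := by
            intro hco
            rw [show q = PySem.Str.slice s (some (k : Int)) (some ((k : Int) + 2)) from (beq_iff_eq.mp hco).symm] at hq
            rw [hq] at hf
            simp at hf
          simp [hne]
      · by_cases h2 : 2 ≤ (k : Int) - (f' : Int)
        · simp only [h2, if_true]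
          constructor
          · intro _
            exact ⟨k, by omega, f', by omega, hKf⟩
          · intro _; trivial
        · simp only [h2, if_false]
          rw [ihf]
          constructor
          · rintro ⟨j, hj, hC⟩; exact ⟨j, by omega, hC⟩
          · rintro ⟨j, hj, i, hi, hp2⟩
            rcases Nat.lt_or_ge j k with hjk | hjk
            · exact ⟨j, hjk, i, hi, hp2⟩
            · have hjek : j = k := by omega
              subst hjek
              have hiK : (PySem.Str.slice s (some (i : Int)) (some ((i : Int) + 2))
                  == PySem.Str.slice s (some (j : Int)) (some ((j : Int) + 2))) = true :=
                beq_iff_eq.mpr ((K_eq_iff s i j).mpr hp2)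
              have hfi : f' ≤ i := by
                by_contra hlt
                have := hmin i (by omega)
                rw [hiK] at this
                exact Bool.noConfusion this
              omega
    | none =>
      have hg : ((List.range k).foldl (fun x (y : Nat) => bodyB s x (y : Int)) (PySem.Dict.empty, false)).1.get?
          (PySem.Str.slice s (some (k : Int)) (some ((k : Int) + 2))) = none := by
        rw [ihd, hf]; rfl
      rw [bodyB_step_none s _ _ hg]
      constructor
      · intro q
        rw [PySem.Dict.get?_insert, List.find?_append, ihd]
        by_cases hq : q = PySem.Str.slice s (some (k : Int)) (some ((k : Int) + 2))
        · subst hq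
          rw [hf]
          simp
        · have hne : (PySem.Str.slice s (some (k : Int)) (some ((k : Int) + 2)) == q) = false := by
            simp only [beq_eq_false_iff_ne, ne_eq]
            exact fun h => hq h.symm
          simp [hne, hq]
      · rw [ihf]
        constructor
        · rintro ⟨j, hj, hC⟩; exact ⟨j, by omega, hC⟩
        · rintro ⟨j, hj, i, hi, hp2⟩
          rcases Nat.lt_or_ge j k with hjk | hjk
          · exact ⟨j, hjk, i, hi, hp2⟩
          · have hjek : j = k := by omega
            subst hjek
            have hiK := beq_iff_eq.mpr ((K_eq_iff s i j).mpr hp2)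
            have := List.find?_eq_none.mp hf i (List.mem_range.mpr (by omega))
            rw [hiK] at this
            exact absurd rfl this

lemma B_char (s : String) : is_nice_string2_alt s = true ↔ NiceR1 s.toList ∧ NiceR2 s.toList := by
  unfold is_nice_string2_alt
  simp only [PySem.Str.len_eq, PySem.List.pyRange_one, List.foldl_map, List.any_map, zero_add]
  rw [Bool.and_eq_true, (B_loop s ((((s.toList.length : Int)) - 1 - 0).toNat)).2]
  simp only [List.any_eq_true, List.mem_range, Function.comp_apply, beq_iff_eq, cast_add_two,
    PySem.Str.pyGet?_natCast]
  apply and_congr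
  · constructor
    · rintro ⟨j, hj, i, hi, hp⟩; exact ⟨j, by omega, i, hi, hp⟩
    · rintro ⟨j, hj, i, hi, hp⟩; exact ⟨j, by omega, i, hi, hp⟩
  · constructor
    · rintro ⟨i, hi, he⟩; exact ⟨i, by omega, he⟩
    · rintro ⟨i, hi, he⟩; exact ⟨i, by omega, he⟩

-- ===== VERDICT (by name: the statement is the Claim_ definition above) =====
theorem is_nice_string2_spec : Claim_equal_is_nice_string2 := by
  intro s _
  unfold Spec_is_nice_string2
  rw [Bool.eq_iff_iff, A_char, B_char]
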